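-- pv_equiv track=rewrite | github.com/TorDamien/Projets | scrabble.py | joker_enquiquinant
-- ===== SOURCE A (Python) =====
-- import copy
--
-- def joker_enquiquinant(mot,ll):
--     a = list(mot)           #ELLE MARCHE
--     b = copy.copy(ll)
--     i = 0
--     while i < len(mot):
--         if mot[i] in b:
--             a.remove(mot[i])
--             b.remove(mot[i])
--         i+=1
--     return a
-- ===== SOURCE B (Python) =====
-- from collections import Counter
--
-- def joker_enquiquinant(mot, ll):
--     budget = Counter(ll)
--     out = []
--     for ch in mot:
--         if budget[ch] > 0:
--             budget[ch] -= 1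
--         else:
--             out.append(ch)
--     return out
-- ===== Notes on version B (the rewrite author's own statement) =====
-- stated objective: faster
-- what changed: Replaces the repeated list.remove/membership scans over two mutable lists with a Counter of removal budgets and a single pass over mot that skips the first budgeted occurrences of each letter.
import Mathlib
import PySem

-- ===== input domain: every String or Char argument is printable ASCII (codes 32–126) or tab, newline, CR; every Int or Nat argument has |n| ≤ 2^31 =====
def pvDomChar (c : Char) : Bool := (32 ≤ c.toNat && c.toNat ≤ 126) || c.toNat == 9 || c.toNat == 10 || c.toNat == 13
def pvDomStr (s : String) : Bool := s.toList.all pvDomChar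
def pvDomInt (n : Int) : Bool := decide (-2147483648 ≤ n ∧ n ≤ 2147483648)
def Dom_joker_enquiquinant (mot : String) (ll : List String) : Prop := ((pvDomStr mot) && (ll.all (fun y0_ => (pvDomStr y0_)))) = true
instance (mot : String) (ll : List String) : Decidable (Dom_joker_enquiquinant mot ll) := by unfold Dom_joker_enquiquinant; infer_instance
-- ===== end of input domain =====

-- B replaces A's quadratic remove/membership scans by a Counter of removal budgets and one pass over mot (faster; return value only, A does not mutate its arguments observably).

-- ===== PORT A =====
-- while loop over the characters of mot in order, with mutable lists a and b;
-- the `.getD` defaults on remove? are unreachable: the guard c ∈ b together with the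
-- loop's history guarantees c ∈ a (removals of c only ever consumed earlier occurrences).
def jokerA_loop : List String → List String → List String → List String
  | [], a, _ => a
  | c :: rest, a, b =>
      if c ∈ b then
        jokerA_loop rest ((PySem.List.remove? a c).getD a) ((PySem.List.remove? b c).getD b)
      else
        jokerA_loop rest a b

def joker_enquiquinant (mot : String) (ll : List String) : List String :=
  jokerA_loop (mot.toList.map (fun c => String.singleton c))
              (mot.toList.map (fun c => String.singleton c)) ll

-- ===== PORT B =====
-- single pass: budget = Counter(ll); keep ch unless its budget is positive (then decrement).
def jokerB_loop : List String → PySem.Dict String Int → List String → List String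
  | [], _, out => out
  | c :: rest, d, out =>
      if d.getD c 0 > 0 then
        jokerB_loop rest (d.insert c (d.getD c 0 - 1)) out
      else
        jokerB_loop rest d (out ++ [c])

def joker_enquiquinant_alt (mot : String) (ll : List String) : List String :=
  jokerB_loop (mot.toList.map (fun c => String.singleton c)) (PySem.Dict.counter ll) []

-- ===== PRECONDITION & SPEC =====
def Spec_joker_enquiquinant (mot : String) (ll : List String) (out : List String) : Prop := out = joker_enquiquinant_alt mot ll
instance (mot : String) (ll : List String) (out : List String) : Decidable (Spec_joker_enquiquinant mot ll out) := by unfold Spec_joker_enquiquinant; infer_instance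

-- ===== CLAIM (what is proved, stated in full; the proofs are below) =====
def Claim_equal_joker_enquiquinant : Prop := ∀ (mot : String) (ll : List String), Dom_joker_enquiquinant mot ll → Spec_joker_enquiquinant mot ll (joker_enquiquinant mot ll)

-- ===== LEMMAS AND PROOFS =====

-- Main invariant: a = out ++ chars, the dict d records the multiset of b,
-- and every char already kept (in out) has exhausted its budget (count 0 in b).
theorem jokerAB_loop_eq (chars : List String) :
    ∀ (b : List String) (d : PySem.Dict String Int) (out : List String),
      (∀ s, d.getD s 0 = (b.count s : Int)) →
      (∀ c ∈ out, b.count c = 0) →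
      jokerA_loop chars (out ++ chars) b = jokerB_loop chars d out := by
  induction chars with
  | nil => intro b d out _ _; simp [jokerA_loop, jokerB_loop]
  | cons c rest ih =>
    intro b d out hcnt hout
    have hmemiff : c ∈ b ↔ d.getD c 0 > 0 := by
      rw [hcnt c]
      constructor
      · intro h
        have : 0 < b.count c := List.count_pos_iff.mpr h
        exact_mod_cast this
      · intro h
        have : 0 < b.count c := by exact_mod_cast h
        exact List.count_pos_iff.mp this
    by_cases hc : c ∈ b
    · have hpos : d.getD c 0 > 0 := hmemiff.mp hc
      have hcnotout : c ∉ out := by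
        intro hmem
        have := hout c hmem
        have : (0 : Int) < 0 := by rw [hcnt c, this] at hpos; exact_mod_cast hpos
        omega
      have hca : c ∈ out ++ c :: rest := by simp
      have hremA : PySem.List.remove? (out ++ c :: rest) c = some (out ++ rest) := by
        rw [PySem.List.remove?_eq_some_erase _ c hca, List.erase_append_right _ hcnotout,
            List.erase_cons_head]
      have hremB : PySem.List.remove? b c = some (b.erase c) :=
        PySem.List.remove?_eq_some_erase b c hc
      rw [jokerA_loop, jokerB_loop, if_pos hc, if_pos hpos, hremA, hremB]
      simp only [Option.getD_some]
      apply ih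
      · intro s
        rw [PySem.Dict.getD_insert]
        by_cases hs : s = c
        · subst hs
          rw [if_pos rfl, hcnt s, List.count_erase_self]
          have : 0 < b.count s := List.count_pos_iff.mpr hc
          omega
        · rw [if_neg hs, hcnt s, List.count_erase_of_ne hs]
      · intro x hx
        have h0 := hout x hx
        rcases eq_or_ne x c with h | h
        · subst h; rw [List.count_erase_self]; omega
        · rw [List.count_erase_of_ne h]; exact h0
    · have hnpos : ¬ d.getD c 0 > 0 := fun h => hc (hmemiff.mpr h)
      rw [jokerA_loop, jokerB_loop, if_neg hc, if_neg hnpos]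
      have : out ++ c :: rest = (out ++ [c]) ++ rest := by simp
      rw [this]
      apply ih _ _ _ hcnt
      intro x hx
      rcases List.mem_append.mp hx with h | h
      · exact hout x h
      · have : x = c := by simpa using h
        subst this
        exact List.count_eq_zero.mpr hc

-- ===== VERDICT (by name: the statement is the Claim_ definition above) =====
theorem joker_enquiquinant_spec : Claim_equal_joker_enquiquinant := by
  intro mot ll _
  unfold Spec_joker_enquiquinant joker_enquiquinant joker_enquiquinant_alt
  have := jokerAB_loop_eq (mot.toList.map (fun c => String.singleton c)) ll
      (PySem.Dict.counter ll) []
      (fun s => PySem.Dict.getD_counter ll s) (by intro c h; simp at h)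
  simpa using this
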